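-- pv_equiv track=rewrite | github.com/2025Autumn-Hackathon-L-team/dokkai | ChatApp/app.py | get_bookroom_group_tags
-- ===== SOURCE A (Python) =====
-- def get_bookroom_group_tags(bookroom_tag_tables):
--     # 空のdictを作成(これにどんどん追加していく)
--     # 空のtagリストを作成（同じブックルームのタグは、1つのリストに入れる。）
--     bookroom_group_tag = {}
--     tags = []
--
--     # 空の場合は空のまま返す
--     if not bookroom_tag_tables:
--         return bookroom_group_tag
--
--     previous_bookroom_id = bookroom_tag_tables[0]["bookroom_id"]
--
--     for bookroom_tag_data in bookroom_tag_tables: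
--         if bookroom_tag_data["bookroom_id"] == previous_bookroom_id:
--             tags.append(bookroom_tag_data["name"])  # タグの名前を追加格納
--         else:
--             bookroom_group_tag[previous_bookroom_id] = tags
--             tags = []
--             tags.append(bookroom_tag_data["name"])  # タグの名前を格納
--             previous_bookroom_id = bookroom_tag_data["bookroom_id"]
--     bookroom_group_tag[previous_bookroom_id] = tags
--     return bookroom_group_tag
-- ===== SOURCE B (Python) =====
-- def get_bookroom_group_tags(bookroom_tag_tables):
--     # Two stages, built from the right: (1) a recursive foldr that turns the
--     # rows into the list of maximal consecutive runs [(id, [names...]) ...] by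
--     # prepending each row onto the runs of the tail; (2) a dict comprehension
--     # over the runs (a later non-consecutive run of the same id overwrites an
--     # earlier one, as plain dict assignment does).
--     def runs(rows):
--         if not rows:
--             return []
--         rest = runs(rows[1:])
--         k, name = rows[0]["bookroom_id"], rows[0]["name"]
--         if rest and rest[0][0] == k:
--             return [(k, [name] + rest[0][1])] + rest[1:]
--         return [(k, [name])] + rest
--     return {k: names for k, names in runs(bookroom_tag_tables)}
-- ===== Notes on version B (the rewrite author's own statement) =====
-- stated objective: alternative
-- what changed: B first builds the list of maximal consecutive runs by a right-to-left recursion (prepending each row onto the runs of the tail, merging with the first run when ids match) and then turns the run list into the dict with a comprehension, instead of A's single left-to-right state machine with previous_bookroom_id and flush-on-change.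
import Mathlib
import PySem

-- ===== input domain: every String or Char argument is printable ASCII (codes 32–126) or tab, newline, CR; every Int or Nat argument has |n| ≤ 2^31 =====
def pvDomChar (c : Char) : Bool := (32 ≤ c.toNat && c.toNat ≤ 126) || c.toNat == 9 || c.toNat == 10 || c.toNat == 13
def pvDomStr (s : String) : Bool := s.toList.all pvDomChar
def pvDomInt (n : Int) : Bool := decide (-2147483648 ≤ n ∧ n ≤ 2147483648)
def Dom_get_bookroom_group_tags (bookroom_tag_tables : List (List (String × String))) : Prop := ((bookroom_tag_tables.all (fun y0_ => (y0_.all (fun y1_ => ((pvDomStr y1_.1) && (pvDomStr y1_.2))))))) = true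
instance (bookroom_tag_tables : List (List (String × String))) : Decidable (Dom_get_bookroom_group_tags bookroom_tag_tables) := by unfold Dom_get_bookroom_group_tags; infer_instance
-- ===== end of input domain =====

-- B builds the run list by a right-to-left recursion and then a dict comprehension,
-- instead of A's left-to-right flush-on-change state machine; equivalence is on the
-- return value (neither mutates its input).

-- row["k"]: exact on Pre_ (the key is present); KeyError inputs are excluded by Pre_ below
def pvKey (row : List (String × String)) (k : String) : String :=
  ((PySem.Dict.mk row).get? k).getD ""

-- ===== PORT A =====
-- the for-loop of A, state (bookroom_group_tag, tags, previous_bookroom_id)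
def pvALoop (l : List (List (String × String)))
    (d : PySem.Dict String (List String)) (tags : List String) (prev : String) :
    PySem.Dict String (List String) × List String × String :=
  match l with
  | [] => (d, tags, prev)
  | r :: rs =>
    if pvKey r "bookroom_id" == prev then
      pvALoop rs d (tags ++ [pvKey r "name"]) prev
    else
      pvALoop rs (d.insert prev tags) [pvKey r "name"] (pvKey r "bookroom_id")

def get_bookroom_group_tags (bookroom_tag_tables : List (List (String × String))) : List (String × List String) :=
  match bookroom_tag_tables with
  | [] => []
  | t0 :: _ =>
    (((pvALoop bookroom_tag_tables PySem.Dict.empty [] (pvKey t0 "bookroom_id")).1.insert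
      (pvALoop bookroom_tag_tables PySem.Dict.empty [] (pvKey t0 "bookroom_id")).2.2
      (pvALoop bookroom_tag_tables PySem.Dict.empty [] (pvKey t0 "bookroom_id")).2.1)).items

-- ===== PORT B =====
-- B's recursive helper `runs`: runs of the tail, then prepend the head row
def pvRuns : List (List (String × String)) → List (String × List String)
  | [] => []
  | r :: rs =>
    let rest := pvRuns rs
    match rest with
    | (k', ns) :: t =>
      if k' == pvKey r "bookroom_id" then
        (pvKey r "bookroom_id", pvKey r "name" :: ns) :: t
      else
        (pvKey r "bookroom_id", [pvKey r "name"]) :: (k', ns) :: t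
    | [] => [(pvKey r "bookroom_id", [pvKey r "name"])]

-- B's dict comprehension over the run list
def get_bookroom_group_tags_alt (bookroom_tag_tables : List (List (String × String))) : List (String × List String) :=
  ((pvRuns bookroom_tag_tables).foldl (fun d p => d.insert p.1 p.2) PySem.Dict.empty).items

-- ===== PRECONDITION & SPEC =====
-- Pre_ excludes exactly the rows missing a "bookroom_id" or "name" key, on which A raises KeyError
def Pre_get_bookroom_group_tags (bookroom_tag_tables : List (List (String × String))) : Prop :=
  ∀ row ∈ bookroom_tag_tables,
    ((PySem.Dict.mk row).get? "bookroom_id").isSome = true ∧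
    ((PySem.Dict.mk row).get? "name").isSome = true
instance (bookroom_tag_tables : List (List (String × String))) : Decidable (Pre_get_bookroom_group_tags bookroom_tag_tables) := by unfold Pre_get_bookroom_group_tags; infer_instance

def pvWitness_get_bookroom_group_tags : (List (List (String × String))) :=
  [[("bookroom_id", "1"), ("name", "sf")], [("bookroom_id", "2"), ("name", "mystery")]]

def Spec_get_bookroom_group_tags (bookroom_tag_tables : List (List (String × String))) (out : List (String × List String)) : Prop := out = get_bookroom_group_tags_alt bookroom_tag_tables
instance (bookroom_tag_tables : List (List (String × String))) (out : List (String × List String)) : Decidable (Spec_get_bookroom_group_tags bookroom_tag_tables out) := by unfold Spec_get_bookroom_group_tags; infer_instance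

-- ===== CLAIM =====
def Claim_equal_get_bookroom_group_tags : Prop := ∀ (bookroom_tag_tables : List (List (String × String))), Dom_get_bookroom_group_tags bookroom_tag_tables → Pre_get_bookroom_group_tags bookroom_tag_tables → Spec_get_bookroom_group_tags bookroom_tag_tables (get_bookroom_group_tags bookroom_tag_tables)

-- ===== LEMMAS AND PROOFS =====

-- merging a pending (prev, tags) group into the front of a run list
def pvMerge (prev : String) (tags : List String) :
    List (String × List String) → List (String × List String)
  | [] => [(prev, tags)]
  | (k', ns) :: t =>
    if k' == prev then (prev, tags ++ ns) :: t else (prev, tags) :: (k', ns) :: t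

theorem pvRuns_cons (r : List (String × String)) (rs : List (List (String × String))) :
    pvRuns (r :: rs) = pvMerge (pvKey r "bookroom_id") [pvKey r "name"] (pvRuns rs) := by
  cases h : pvRuns rs with
  | nil => simp [pvRuns, pvMerge, h]
  | cons p t =>
    cases p with
    | mk k' ns => simp [pvRuns, pvMerge, h]

-- A's loop, finished with the final flush, equals the fold of the runs of the
-- remaining rows merged with the pending group (prev, tags).
theorem pvMain (l : List (List (String × String)))
    (d : PySem.Dict String (List String)) (tags : List String) (prev : String) :
    ((pvALoop l d tags prev).1.insert (pvALoop l d tags prev).2.2 (pvALoop l d tags prev).2.1) =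
    (pvMerge prev tags (pvRuns l)).foldl (fun d p => d.insert p.1 p.2) d := by
  induction l generalizing d tags prev with
  | nil => simp [pvALoop, pvRuns, pvMerge]
  | cons r rs ih =>
    rw [pvRuns_cons]
    cases h : (pvKey r "bookroom_id" == prev) with
    | true =>
      have hk : pvKey r "bookroom_id" = prev := by simpa using h
      simp only [pvALoop, h, if_true]
      rw [ih]
      cases hr : pvRuns rs with
      | nil => simp [pvMerge, hk]
      | cons p t =>
        cases p with
        | mk k' ns =>
          by_cases hk' : k' = prev
          · simp [pvMerge, hk, hk']
          · simp [pvMerge, hk, hk']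
    | false =>
      have hk : pvKey r "bookroom_id" ≠ prev := by simpa using h
      simp only [pvALoop, h, Bool.false_eq_true, if_false]
      rw [ih]
      cases hr : pvRuns rs with
      | nil => simp [pvMerge, hk, Ne.symm hk]
      | cons p t =>
        cases p with
        | mk k' ns =>
          by_cases hk' : k' = pvKey r "bookroom_id"
          · simp [pvMerge, hk', hk]
          · simp [pvMerge, hk', hk]

theorem get_bookroom_group_tags_eq (ts : List (List (String × String))) :
    get_bookroom_group_tags ts = get_bookroom_group_tags_alt ts := by
  cases ts with
  | nil =>
    simp [get_bookroom_group_tags, get_bookroom_group_tags_alt, pvRuns, PySem.Dict.empty]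
  | cons t0 rest =>
    simp only [get_bookroom_group_tags, get_bookroom_group_tags_alt]
    rw [pvMain, pvRuns_cons]
    cases hr : pvRuns rest with
    | nil => simp [pvMerge]
    | cons p t =>
      cases p with
      | mk k' ns =>
        by_cases hk' : k' = pvKey t0 "bookroom_id"
        · simp [pvMerge, hk']
        · simp [pvMerge, hk']

-- ===== VERDICT =====
theorem get_bookroom_group_tags_spec : Claim_equal_get_bookroom_group_tags := by
  intro ts _ _
  unfold Spec_get_bookroom_group_tags
  exact get_bookroom_group_tags_eq ts
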